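-- pv_equiv track=rewrite | github.com/minebean0502/Programmers | 프로그래머스/unrated/181890. 왼쪽 오른쪽/왼쪽 오른쪽.py | solution
-- ===== SOURCE A (Python) =====
-- def solution(str_list):
--     answer = []
--     j = 0
--     for i in range(len(str_list)):
--         if str_list[j] == "r":
--             return str_list[j+1:]
--             break
--         elif str_list[j] == "l":
--             return str_list[:j]
--             break
--         j += 1
--     return []
-- ===== SOURCE B (Python) =====
-- def solution(str_list):
--     n = len(str_list)
--     r = str_list.index("r") if "r" in str_list else n
--     l = str_list.index("l") if "l" in str_list else n
--     if r == n and l == n: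
--         return []
--     return str_list[r+1:] if r < l else str_list[:l]
-- ===== Notes on version B (the rewrite author's own statement) =====
-- stated objective: idiomatic
-- what changed: Replaces the manual stop-at-first-match index loop with two first-index lookups (str.index guarded by membership) plus one comparison deciding which slice to return.
import Mathlib
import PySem

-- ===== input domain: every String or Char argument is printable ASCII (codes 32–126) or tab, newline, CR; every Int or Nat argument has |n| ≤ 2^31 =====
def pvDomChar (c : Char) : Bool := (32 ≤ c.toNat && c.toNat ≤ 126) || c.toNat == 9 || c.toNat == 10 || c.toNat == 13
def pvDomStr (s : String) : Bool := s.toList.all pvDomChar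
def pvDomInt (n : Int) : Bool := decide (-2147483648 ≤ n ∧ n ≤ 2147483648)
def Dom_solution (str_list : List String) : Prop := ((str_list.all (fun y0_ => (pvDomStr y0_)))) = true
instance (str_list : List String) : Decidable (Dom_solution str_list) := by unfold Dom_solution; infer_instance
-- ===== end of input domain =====

-- B replaces A's manual stop-at-first-match index loop by two first-index lookups and one
-- comparison (idiomatic; same O(n) cost).

-- ===== PORT A =====
-- A scans with index j (always equal to the loop counter i); the fuel is the number of
-- remaining iterations of `for i in range(len(str_list))`.
def solutionGo (str_list : List String) (j : Nat) : Nat → List String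
  | 0 => []
  | fuel + 1 =>
    if PySem.List.pyGetD str_list (j : Int) "" = "r" then
      PySem.List.slice str_list (some ((j : Int) + 1)) none
    else if PySem.List.pyGetD str_list (j : Int) "" = "l" then
      PySem.List.slice str_list none (some (j : Int))
    else
      solutionGo str_list (j + 1) fuel

def solution (str_list : List String) : List String :=
  solutionGo str_list 0 str_list.length

-- ===== PORT B =====
def solution_alt (str_list : List String) : List String :=
  let n := str_list.length
  let r := (PySem.List.index? str_list "r").getD n
  let l := (PySem.List.index? str_list "l").getD n
  if r = n ∧ l = n then []
  else if r < l then PySem.List.slice str_list (some ((r : Int) + 1)) none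
  else PySem.List.slice str_list none (some (l : Int))

-- ===== PRECONDITION & SPEC =====
def Spec_solution (str_list : List String) (out : List String) : Prop := out = solution_alt str_list
instance (str_list : List String) (out : List String) : Decidable (Spec_solution str_list out) := by unfold Spec_solution; infer_instance

-- ===== CLAIM (what is proved, stated in full; the proofs are below) =====
def Claim_equal_solution : Prop := ∀ (str_list : List String), Dom_solution str_list → Spec_solution str_list (solution str_list)

-- ===== LEMMAS AND PROOFS =====

-- reference function both ports are reduced to
def refRun (pre : List String) : List String → List String
  | [] => []
  | x :: t => if x = "r" then t else if x = "l" then pre else refRun (pre ++ [x]) t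

lemma index?_prefix_free {v : String} (pre suf : List String) (h : v ∉ pre) :
    PySem.List.index? (pre ++ v :: suf) v = some pre.length :=
  (PySem.List.index?_eq_some_iff _ _ _).2 ⟨pre, suf, rfl, rfl, h⟩

lemma index?_lower_bound {v : String} (pre t : List String) (h : v ∉ pre) {k : Nat}
    (hk : PySem.List.index? (pre ++ t) v = some k) : pre.length ≤ k := by
  by_contra hlt
  rw [Nat.not_le] at hlt
  obtain ⟨hklen, hget, -⟩ := PySem.List.getElem_of_index?_eq_some hk
  have heq : (pre ++ t)[k] = pre[k]'hlt := List.getElem_append_left hlt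
  exact h (hget ▸ heq ▸ List.getElem_mem hlt)

lemma goA_eq (t pre : List String) :
    solutionGo (pre ++ t) pre.length t.length = refRun pre t := by
  induction t generalizing pre with
  | nil => simp [solutionGo, refRun]
  | cons x t ih =>
    have hget : PySem.List.pyGetD (pre ++ x :: t) (pre.length : Int) "" = x := by
      rw [PySem.List.pyGetD_natCast]
      simp [List.getD]
    have hcast : ((pre.length : Int) + 1) = ((pre.length + 1 : Nat) : Int) := by
      push_cast; ring
    simp only [List.length_cons, solutionGo, hget, refRun]
    by_cases hr : x = "r"
    · rw [if_pos hr, if_pos hr, hcast, PySem.List.slice_from_natCast]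
      simp
    · rw [if_neg hr, if_neg hr]
      by_cases hl : x = "l"
      · rw [if_pos hl, if_pos hl, PySem.List.slice_to_natCast]
        simp
      · rw [if_neg hl, if_neg hl]
        have := ih (pre ++ [x])
        simpa [List.append_assoc] using this

lemma altB_eq (t pre : List String) (hr : "r" ∉ pre) (hl : "l" ∉ pre) :
    solution_alt (pre ++ t) = refRun pre t := by
  induction t generalizing pre with
  | nil =>
    have h1 : List.idxOf? "r" pre = none := by
      rw [← PySem.List.index?_eq_idxOf?]
      exact (PySem.List.index?_eq_none_iff _ _).2 hr
    have h2 : List.idxOf? "l" pre = none := by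
      rw [← PySem.List.index?_eq_idxOf?]
      exact (PySem.List.index?_eq_none_iff _ _).2 hl
    simp [solution_alt, h1, h2, refRun]
  | cons x t ih =>
    have hlen : (pre ++ x :: t).length = pre.length + 1 + t.length := by
      simp; omega
    by_cases hxr : x = "r"
    · subst hxr
      have hR : PySem.List.index? (pre ++ "r" :: t) "r" = some pre.length :=
        index?_prefix_free pre t hr
      have hcast : ((pre.length : Int) + 1) = ((pre.length + 1 : Nat) : Int) := by
        push_cast; ring
      have hrhs : refRun pre ("r" :: t) = t := by simp [refRun]
      rw [hrhs]
      cases hL : PySem.List.index? (pre ++ "r" :: t) "l" with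
      | none =>
        simp only [solution_alt, hR, hL, Option.getD_some, Option.getD_none]
        rw [if_neg (fun h => by omega), if_pos (by omega), hcast,
          PySem.List.slice_from_natCast]
        simp
      | some k =>
        have hk : pre.length + 1 ≤ k := by
          have hnot : ("l" : String) ∉ pre ++ ["r"] := by simp [hl]
          have := index?_lower_bound (pre ++ ["r"]) t hnot
            (by simpa [List.append_assoc] using hL)
          simpa using this
        simp only [solution_alt, hR, hL, Option.getD_some]
        rw [if_neg (fun h => by omega), if_pos (by omega), hcast,
          PySem.List.slice_from_natCast]
        simp
    · by_cases hxl : x = "l"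
      · subst hxl
        have hL : PySem.List.index? (pre ++ "l" :: t) "l" = some pre.length :=
          index?_prefix_free pre t hl
        have hrhs : refRun pre ("l" :: t) = pre := by simp [refRun]
        rw [hrhs]
        cases hR : PySem.List.index? (pre ++ "l" :: t) "r" with
        | none =>
          simp only [solution_alt, hR, hL, Option.getD_some, Option.getD_none]
          rw [if_neg (fun h => by omega), if_neg (by omega),
            PySem.List.slice_to_natCast]
          simp
        | some k =>
          have hk : pre.length + 1 ≤ k := by
            have hnot : ("r" : String) ∉ pre ++ ["l"] := by simp [hr]
            have := index?_lower_bound (pre ++ ["l"]) t hnot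
              (by simpa [List.append_assoc] using hR)
            simpa using this
          simp only [solution_alt, hR, hL, Option.getD_some]
          rw [if_neg (fun h => by omega), if_neg (by omega),
            PySem.List.slice_to_natCast]
          simp
      · have hrec := ih (pre ++ [x])
          (by simp only [List.mem_append, List.mem_singleton]
              exact fun h => h.elim hr (fun h => hxr h.symm))
          (by simp only [List.mem_append, List.mem_singleton]
              exact fun h => h.elim hl (fun h => hxl h.symm))
        simp only [refRun, if_neg hxr, if_neg hxl]
        rw [← hrec, List.append_assoc]
        rfl

-- ===== VERDICT (by name: the statement is the Claim_ definition above) =====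
theorem solution_spec : Claim_equal_solution := by
  intro xs _
  unfold Spec_solution solution
  have hA := goA_eq xs []
  have hB := altB_eq xs [] (by simp) (by simp)
  simp only [List.nil_append, List.length_nil] at hA hB
  rw [hA, hB]
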